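-- pv_equiv track=rewrite | github.com/Fondamenti18/fondamenti-di-programmazione | students/1798179/homework01/program03.py | disordinamento
-- ===== SOURCE A (Python) =====
-- def disordinamento(s):
--     a=len(s)-1
--     dis=[]
--     s_dis=""
--     while a>=0:
--         if "a"<=s[a]<="z":
--             dis=[s[a]]+dis
--             if s[a] in dis[1: ]:
--                 dis.remove(s[a])
--         a=a-1
--     return s_dis.join(dis)
-- ===== SOURCE B (Python) =====
-- def disordinamento(s):
--     last = {}
--     for i, c in enumerate(s):
--         if "a" <= c <= "z":
--             last[c] = i
--     return "".join(c for c, _ in sorted(last.items(), key=lambda kv: kv[1]))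
-- ===== Notes on version B (the rewrite author's own statement) =====
-- stated objective: faster
-- what changed: Instead of A's right-to-left scan maintaining an ordered list by prepend/slice-scan/remove, B makes one forward pass recording each lowercase letter's last index in a dict and then sorts the 26-at-most entries by index.
import Mathlib
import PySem

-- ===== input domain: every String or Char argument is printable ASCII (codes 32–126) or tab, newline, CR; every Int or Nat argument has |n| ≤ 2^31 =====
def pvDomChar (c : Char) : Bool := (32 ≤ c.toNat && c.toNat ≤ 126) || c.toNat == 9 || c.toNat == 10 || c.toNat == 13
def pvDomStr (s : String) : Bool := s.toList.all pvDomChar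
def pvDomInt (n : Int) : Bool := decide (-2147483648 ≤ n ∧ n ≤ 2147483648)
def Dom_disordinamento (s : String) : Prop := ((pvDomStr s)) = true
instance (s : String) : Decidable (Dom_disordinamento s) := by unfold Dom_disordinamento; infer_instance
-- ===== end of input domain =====

-- B replaces A's right-to-left list surgery by one forward pass recording each lowercase
-- letter's last index in a dict, then sorting the (at most 26) entries by index (measured faster).

-- ===== PORT A =====
-- one iteration of A's while-loop body, for the character c = s[a]
def dStepA (c : Char) (dis : List Char) : List Char :=
  if 'a' ≤ c ∧ c ≤ 'z' then
    let d := c :: dis                                   -- dis = [s[a]] + dis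
    if c ∈ d.drop 1 then                                -- if s[a] in dis[1:]
      (PySem.List.remove? d c).getD d                   -- dis.remove(s[a]) (always succeeds: head matches)
    else d
  else dis

-- the while-loop: a runs n-1, n-2, …, 0
def dLoopA (cs : List Char) : Nat → List Char → List Char
  | 0, dis => dis
  | n+1, dis =>
    match PySem.List.pyGet? cs (n : Int) with
    | none => dis                                       -- unreachable: n < len cs whenever called
    | some c => dLoopA cs n (dStepA c dis)

def disordinamento (s : String) : String :=
  String.ofList (dLoopA s.toList s.toList.length [])        -- s_dis.join(dis) with s_dis = ""

-- ===== PORT B =====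
-- the for-loop body: last[c] = i for a lowercase c
def dStepB (d : PySem.Dict Char Int) (p : Int × Char) : PySem.Dict Char Int :=
  if 'a' ≤ p.2 ∧ p.2 ≤ 'z' then d.insert p.2 p.1 else d

-- the for-loop over enumerate(s)
def dLast (s : String) : PySem.Dict Char Int :=
  (PySem.List.enumerate s.toList).foldl dStepB PySem.Dict.empty

def disordinamento_alt (s : String) : String :=
  String.ofList ((PySem.List.sorted (dLast s).items (fun kv => kv.2)).map (·.1))

-- ===== PRECONDITION & SPEC =====
def Spec_disordinamento (s : String) (out : String) : Prop := out = disordinamento_alt s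
instance (s : String) (out : String) : Decidable (Spec_disordinamento s out) := by unfold Spec_disordinamento; infer_instance

-- ===== CLAIM (what is proved, stated in full; the proofs are below) =====
def Claim_equal_disordinamento : Prop := ∀ (s : String), Dom_disordinamento s → Spec_disordinamento s (disordinamento s)

-- ===== LEMMAS AND PROOFS =====

-- A's step keeps the new char only if it is lowercase and not already present
theorem dStepA_eq (c : Char) (dis : List Char) :
    dStepA c dis = if ('a' ≤ c ∧ c ≤ 'z') ∧ c ∉ dis then c :: dis else dis := by
  unfold dStepA
  by_cases hlc : 'a' ≤ c ∧ c ≤ 'z'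
  · simp only [hlc, if_pos, List.drop_one, List.tail_cons, true_and]
    by_cases hm : c ∈ dis
    · simp [hm, PySem.List.remove?_cons_self]
    · simp [hm]
  · simp [hlc]

-- B's step, on an explicit pair
theorem dStepB_eq (d : PySem.Dict Char Int) (i : Int) (c : Char) :
    dStepB d (i, c) = if 'a' ≤ c ∧ c ≤ 'z' then d.insert c i else d := rfl

-- A's loop is a left fold over the first n characters, taken right to left
theorem dLoopA_eq_foldl (cs : List Char) (n : Nat) (h : n ≤ cs.length) (dis : List Char) :
    dLoopA cs n dis = ((cs.take n).reverse).foldl (fun d c => dStepA c d) dis := by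
  induction n generalizing dis with
  | zero => simp [dLoopA]
  | succ m ih =>
    have hm : m < cs.length := h
    have hget : PySem.List.pyGet? cs (m : Int) = some cs[m] := by
      simp [hm]
    rw [List.take_add_one]
    simp only [List.getElem?_eq_getElem hm, Option.toList_some, List.reverse_append,
      List.reverse_cons, List.reverse_nil, List.nil_append, List.cons_append,
      List.foldl_cons]
    rw [dLoopA, hget]
    exact ih (Nat.le_of_lt hm) (dStepA cs[m] dis)

-- A's whole computation, as a function of the character list
def aRes (cs : List Char) : List Char := cs.reverse.foldl (fun d c => dStepA c d) []

theorem aRes_cons (c : Char) (t : List Char) : aRes (c :: t) = dStepA c (aRes t) := by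
  simp [aRes, List.foldl_append]

theorem mem_aRes (t : List Char) (x : Char) :
    x ∈ aRes t ↔ ('a' ≤ x ∧ x ≤ 'z') ∧ x ∈ t := by
  induction t with
  | nil => simp [aRes]
  | cons c t ih =>
    rw [aRes_cons, dStepA_eq]
    split_ifs with h
    · simp only [List.mem_cons, ih]
      constructor
      · rintro (rfl | ⟨hl, hm⟩)
        · exact ⟨h.1, Or.inl rfl⟩
        · exact ⟨hl, Or.inr hm⟩
      · rintro ⟨hl, hor⟩
        rcases hor with rfl | hm
        · exact Or.inl rfl
        · exact Or.inr ⟨hl, hm⟩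
    · rw [ih]
      constructor
      · rintro ⟨hl, hm⟩
        exact ⟨hl, List.mem_cons_of_mem c hm⟩
      · rintro ⟨hl, hor⟩
        rcases List.mem_cons.mp hor with rfl | hm
        · exact ⟨hl, not_not.mp (fun hc => h ⟨hl, fun hr => hc ((ih.mp hr).2)⟩)⟩
        · exact ⟨hl, hm⟩

-- last-occurrence index of x in t (meaningful when x ∈ t)
def lastOcc (t : List Char) (x : Char) : Nat := t.length - 1 - t.reverse.idxOf x

-- the kept characters with their (last-occurrence) indices, head-recursively:
-- keep c iff lowercase and absent later in the string
def tp : List Char → Int → List (Char × Int)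
  | [], _ => []
  | c :: t, s => if ('a' ≤ c ∧ c ≤ 'z') ∧ c ∉ t then (c, s) :: tp t (s + 1) else tp t (s + 1)

theorem lastOcc_cons_of_mem (c : Char) (t : List Char) (x : Char) (h : x ∈ t) :
    lastOcc (c :: t) x = lastOcc t x + 1 := by
  have h1 : x ∈ t.reverse := by simpa using h
  have h2 : t.reverse.idxOf x < t.length := by simpa using List.idxOf_lt_length_of_mem h1
  unfold lastOcc
  rw [List.reverse_cons, List.idxOf_append_of_mem h1]
  simp only [List.length_cons]
  omega

theorem lastOcc_cons_self_of_not_mem (c : Char) (t : List Char) (h : c ∉ t) :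
    lastOcc (c :: t) c = 0 := by
  have h1 : c ∉ t.reverse := by simpa using h
  unfold lastOcc
  rw [List.reverse_cons, List.idxOf_append_of_notMem h1]
  simp

theorem mem_tp (t : List Char) (s : Int) (x : Char) (i : Int) :
    (x, i) ∈ tp t s ↔ ('a' ≤ x ∧ x ≤ 'z') ∧ x ∈ t ∧ i = s + (lastOcc t x : Int) := by
  induction t generalizing s with
  | nil => simp [tp]
  | cons c t ih =>
    unfold tp
    split_ifs with h
    · simp only [List.mem_cons, Prod.mk.injEq, ih]
      constructor
      · rintro (⟨rfl, rfl⟩ | ⟨hl, hm, rfl⟩)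
        · exact ⟨h.1, Or.inl rfl, by rw [lastOcc_cons_self_of_not_mem _ _ h.2]; simp⟩
        · exact ⟨hl, Or.inr hm, by rw [lastOcc_cons_of_mem _ _ _ hm]; push_cast; ring⟩
      · rintro ⟨hl, hor, hi⟩
        rcases hor with rfl | hm
        · refine Or.inl ⟨rfl, ?_⟩
          rw [lastOcc_cons_self_of_not_mem _ _ h.2] at hi
          simpa using hi
        · refine Or.inr ⟨hl, hm, ?_⟩
          rw [lastOcc_cons_of_mem _ _ _ hm] at hi
          push_cast at hi ⊢
          omega
    · rw [ih]
      constructor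
      · rintro ⟨hl, hm, rfl⟩
        exact ⟨hl, List.mem_cons_of_mem c hm,
          by rw [lastOcc_cons_of_mem _ _ _ hm]; push_cast; ring⟩
      · rintro ⟨hl, hor, hi⟩
        rcases List.mem_cons.mp hor with rfl | hm
        · have hm' : x ∈ t := not_not.mp (fun hc => h ⟨hl, hc⟩)
          refine ⟨hl, hm', ?_⟩
          rw [lastOcc_cons_of_mem _ _ _ hm'] at hi
          push_cast at hi ⊢
          omega
        · refine ⟨hl, hm, ?_⟩
          rw [lastOcc_cons_of_mem _ _ _ hm] at hi
          push_cast at hi ⊢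
          omega

-- every index produced by tp is ≥ the start
theorem tp_snd_ge (t : List Char) (s : Int) : ∀ p ∈ tp t s, s ≤ p.2 := by
  induction t generalizing s with
  | nil => simp [tp]
  | cons c t ih =>
    intro p hp
    unfold tp at hp
    split_ifs at hp with h
    · rcases List.mem_cons.mp hp with rfl | hp
      · exact le_refl _
      · exact le_trans (by omega) (ih (s + 1) p hp)
    · exact le_trans (by omega) (ih (s + 1) p hp)

-- indices in tp strictly increase
theorem tp_pairwise (t : List Char) (s : Int) :
    (tp t s).Pairwise (fun a b => a.2 < b.2) := by
  induction t generalizing s with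
  | nil => simp [tp]
  | cons c t ih =>
    unfold tp
    split_ifs with h
    · exact List.Pairwise.cons
        (fun q hq => lt_of_lt_of_le (by omega) (tp_snd_ge t (s + 1) q hq)) (ih (s + 1))
    · exact ih (s + 1)

-- the forward dict loop: characterization of lookups
theorem get?_foldl_dStepB (t : List Char) (s : Int) (d : PySem.Dict Char Int) (x : Char) :
    ((PySem.List.enumerate t s).foldl dStepB d).get? x =
      if ('a' ≤ x ∧ x ≤ 'z') ∧ x ∈ t then some (s + (lastOcc t x : Int)) else d.get? x := by
  induction t generalizing s d with
  | nil => simp [PySem.List.enumerate_nil]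
  | cons c t ih =>
    rw [PySem.List.enumerate_cons, List.foldl_cons, ih, dStepB_eq]
    by_cases hm : ('a' ≤ x ∧ x ≤ 'z') ∧ x ∈ t
    · rw [if_pos hm, if_pos ⟨hm.1, List.mem_cons_of_mem c hm.2⟩, lastOcc_cons_of_mem _ _ _ hm.2]
      push_cast
      ring_nf
    · rw [if_neg hm]
      by_cases hxc : x = c
      · subst hxc
        by_cases hl : 'a' ≤ x ∧ x ≤ 'z'
        · have hnt : x ∉ t := fun ht => hm ⟨hl, ht⟩
          rw [if_pos hl, PySem.Dict.get?_insert_self,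
            if_pos ⟨hl, List.mem_cons_self⟩, lastOcc_cons_self_of_not_mem _ _ hnt]
          norm_num
        · rw [if_neg hl, if_neg (fun hc : ('a' ≤ x ∧ x ≤ 'z') ∧ x ∈ x :: t => hl hc.1)]
      · rw [if_neg (fun hc : ('a' ≤ x ∧ x ≤ 'z') ∧ x ∈ c :: t =>
          hm ⟨hc.1, (List.mem_cons.mp hc.2).resolve_left hxc⟩)]
        by_cases hl : 'a' ≤ c ∧ c ≤ 'z'
        · rw [if_pos hl]
          exact PySem.Dict.get?_insert_of_ne d s hxc
        · rw [if_neg hl]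

-- keys stay nodup through the conditional-insert loop
theorem nodup_keys_foldl_dStepB (l : List (Int × Char)) (d : PySem.Dict Char Int)
    (h : d.keys.Nodup) : (l.foldl dStepB d).keys.Nodup := by
  induction l generalizing d with
  | nil => exact h
  | cons p l ih =>
    rw [List.foldl_cons]
    apply ih
    unfold dStepB
    split_ifs with hl
    · exact PySem.Dict.nodup_keys_insert _ _ _ h
    · exact h

-- tp's pairs are exactly the dict's items (as sets)
theorem mem_items_dLast (s : String) (x : Char) (i : Int) :
    (x, i) ∈ (dLast s).items ↔ (x, i) ∈ tp s.toList 0 := by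
  have hnd : (dLast s).keys.Nodup :=
    nodup_keys_foldl_dStepB _ _ (by rw [PySem.Dict.keys_empty]; exact List.nodup_nil)
  rw [← PySem.Dict.get?_eq_some_iff_mem_items _ _ _ hnd, mem_tp, dLast, get?_foldl_dStepB]
  split_ifs with h
  · simp [h.1, h.2, eq_comm]
  · rw [PySem.Dict.get?_empty]
    simp only [false_iff, reduceCtorEq]
    exact fun hc => h ⟨hc.1, hc.2.1⟩

theorem tp_nodup (t : List Char) (s : Int) : (tp t s).Nodup :=
  (tp_pairwise t s).imp (fun h => by rintro rfl; exact lt_irrefl _ h)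

theorem items_dLast_nodup (s : String) : (dLast s).items.Nodup :=
  List.Nodup.of_map Prod.fst
    (nodup_keys_foldl_dStepB _ _ (by rw [PySem.Dict.keys_empty]; exact List.nodup_nil))

theorem tp_perm_items (s : String) : (tp s.toList 0).Perm (dLast s).items := by
  apply List.perm_of_nodup_nodup_toFinset_eq (tp_nodup _ _) (items_dLast_nodup s)
  ext p
  obtain ⟨x, i⟩ := p
  simp only [List.mem_toFinset]
  exact (mem_items_dLast s x i).symm

-- aRes is the first components of tp
theorem aRes_eq_map_tp (t : List Char) (s : Int) : aRes t = (tp t s).map (·.1) := by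
  induction t generalizing s with
  | nil => simp [aRes, tp]
  | cons c t ih =>
    rw [aRes_cons, dStepA_eq]
    unfold tp
    by_cases h : ('a' ≤ c ∧ c ≤ 'z') ∧ c ∉ t
    · rw [if_pos ⟨h.1, fun hc => h.2 ((mem_aRes t c).mp hc).2⟩, if_pos h,
        List.map_cons, ih (s + 1)]
    · rw [if_neg h, if_neg (fun hc : ('a' ≤ c ∧ c ≤ 'z') ∧ c ∉ aRes t =>
        h ⟨hc.1, fun hm => hc.2 ((mem_aRes t c).mpr ⟨hc.1, hm⟩)⟩), ih (s + 1)]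

-- ===== VERDICT (by name: the statement is the Claim_ definition above) =====
theorem disordinamento_spec : Claim_equal_disordinamento := by
  intro s _
  unfold Spec_disordinamento disordinamento disordinamento_alt
  rw [dLoopA_eq_foldl s.toList s.toList.length (le_refl _) [], List.take_length]
  rw [show (s.toList.reverse.foldl (fun d c => dStepA c d) []) = aRes s.toList from rfl]
  rw [PySem.List.sorted_eq_of_perm_of_pairwise_lt (dLast s).items (tp s.toList 0)
    (fun kv => kv.2) (tp_perm_items s) (tp_pairwise _ _)]
  rw [aRes_eq_map_tp s.toList 0]
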